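-- pv_equiv track=rewrite | github.com/Martina-Vitkovicova/Registration_Methods_Visual_Comparison | old_project_files/Project_1.py | rename_faces
-- ===== SOURCE A (Python) =====
-- def rename_faces(all_vertices, faces_dict):
--     result_faces = []
--     face = []
--     for vertex in all_vertices:
--         face.append(faces_dict[tuple(vertex)])
--         if len(face) == 3:
--             result_faces.append(face)
--             face = []
--     return result_faces
-- ===== SOURCE B (Python) =====
-- def rename_faces(all_vertices, faces_dict):
--     mapped = [faces_dict[tuple(vertex)] for vertex in all_vertices]
--     return [list(t) for t in zip(*[iter(mapped)] * 3)]
-- ===== Notes on version B (the rewrite author's own statement) =====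
-- stated objective: simpler
-- what changed: Replaces the stateful loop with a manual 3-element accumulator by a single mapping pass followed by the standard zip-of-one-iterator grouper idiom that chunks into complete triples.
import Mathlib
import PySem

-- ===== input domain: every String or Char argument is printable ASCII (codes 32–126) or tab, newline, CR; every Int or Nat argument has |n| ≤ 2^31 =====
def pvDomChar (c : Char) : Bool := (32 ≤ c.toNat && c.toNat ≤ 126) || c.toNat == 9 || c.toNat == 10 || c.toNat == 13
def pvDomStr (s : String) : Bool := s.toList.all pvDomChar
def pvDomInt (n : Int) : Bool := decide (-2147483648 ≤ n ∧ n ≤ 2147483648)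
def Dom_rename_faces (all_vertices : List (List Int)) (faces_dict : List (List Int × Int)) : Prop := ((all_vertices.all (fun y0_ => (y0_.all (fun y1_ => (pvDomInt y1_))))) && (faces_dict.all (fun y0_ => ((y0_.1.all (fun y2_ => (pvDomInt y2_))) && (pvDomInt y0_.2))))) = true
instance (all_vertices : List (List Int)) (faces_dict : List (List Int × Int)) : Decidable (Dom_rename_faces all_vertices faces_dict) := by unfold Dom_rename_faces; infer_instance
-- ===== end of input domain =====

-- B replaces A's stateful loop (manual 3-element accumulator) by one mapping pass
-- followed by grouping into complete triples; objective: simpler.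


-- ===== PORT A =====
-- for vertex in all_vertices: face.append(d[vertex]); if len(face)==3: flush
def rename_faces (all_vertices : List (List Int)) (faces_dict : List (List Int × Int)) : List (List Int) :=
  let d := PySem.Dict.ofList faces_dict
  (all_vertices.foldl
    (fun (st : List (List Int) × List Int) vertex =>
      let face := st.2 ++ [d.getD vertex 0]   -- key present under Pre_, so getD never uses the default
      if face.length == 3 then (st.1 ++ [face], []) else (st.1, face))
    ([], [])).1

-- ===== PORT B =====
-- group a list into complete triples, dropping a trailing partial group (zip(*[iter(m)]*3))
def pvChunk3 : List Int → List (List Int)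
  | a :: b :: c :: rest => [a, b, c] :: pvChunk3 rest
  | _ => []

def rename_faces_alt (all_vertices : List (List Int)) (faces_dict : List (List Int × Int)) : List (List Int) :=
  let d := PySem.Dict.ofList faces_dict
  pvChunk3 (all_vertices.map (fun vertex => d.getD vertex 0))

-- ===== PRECONDITION & SPEC =====
-- Pre_ excludes inputs with a vertex absent from faces_dict, on which Python A raises KeyError.
def Pre_rename_faces (all_vertices : List (List Int)) (faces_dict : List (List Int × Int)) : Prop :=
  ∀ v ∈ all_vertices, v ∈ faces_dict.map Prod.fst
instance (all_vertices : List (List Int)) (faces_dict : List (List Int × Int)) : Decidable (Pre_rename_faces all_vertices faces_dict) := by unfold Pre_rename_faces; infer_instance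
def pvWitness_rename_faces : List (List Int) × (List (List Int × Int)) :=
  ([[0, 1], [1, 2], [2, 3], [0, 1]], [([0, 1], 5), ([1, 2], 6), ([2, 3], 7)])

def Spec_rename_faces (all_vertices : List (List Int)) (faces_dict : List (List Int × Int)) (out : List (List Int)) : Prop := out = rename_faces_alt all_vertices faces_dict
instance (all_vertices : List (List Int)) (faces_dict : List (List Int × Int)) (out : List (List Int)) : Decidable (Spec_rename_faces all_vertices faces_dict out) := by unfold Spec_rename_faces; infer_instance

-- ===== CLAIM (what is proved, stated in full; the proofs are below) =====
def Claim_equal_rename_faces : Prop := ∀ (all_vertices : List (List Int)) (faces_dict : List (List Int × Int)), Dom_rename_faces all_vertices faces_dict → Pre_rename_faces all_vertices faces_dict → Spec_rename_faces all_vertices faces_dict (rename_faces all_vertices faces_dict)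

-- ===== LEMMAS AND PROOFS =====
-- Invariant of A's loop: with a partial face of length < 3 in hand, the final result is
-- the flushed faces so far followed by the complete triples of (face ++ mapped rest).
theorem pv_loop (f : List Int → Int) :
    ∀ (l : List (List Int)) (res : List (List Int)) (face : List Int), face.length < 3 →
    (l.foldl
      (fun (st : List (List Int) × List Int) vertex =>
        let fc := st.2 ++ [f vertex]
        if fc.length == 3 then (st.1 ++ [fc], ([] : List Int)) else (st.1, fc))
      (res, face)).1
    = res ++ pvChunk3 (face ++ l.map f) := by
  intro l
  induction l with
  | nil =>
    intro res face h
    rcases face with _ | ⟨a, _ | ⟨b, _ | ⟨c, t⟩⟩⟩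
    · simp [pvChunk3]
    · simp [pvChunk3]
    · simp [pvChunk3]
    · exfalso; simp at h; omega
  | cons v l ih =>
    intro res face h
    rcases face with _ | ⟨a, _ | ⟨b, _ | ⟨c, t⟩⟩⟩
    · simpa [pvChunk3] using ih res [f v] (by simp)
    · simpa [pvChunk3] using ih res [a, f v] (by simp)
    · simpa [pvChunk3] using ih (res ++ [[a, b, f v]]) [] (by simp)
    · exfalso; simp at h; omega

-- ===== VERDICT (by name: the statement is the Claim_ definition above) =====
theorem rename_faces_spec : Claim_equal_rename_faces := by
  intro all_vertices faces_dict _ _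
  unfold Spec_rename_faces rename_faces rename_faces_alt
  simpa using pv_loop (fun v => (PySem.Dict.ofList faces_dict).getD v 0) all_vertices [] [] (by simp)
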